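-- pv_equiv track=rewrite | github.com/jncc/aerius-data-pipeline | aeriusdatapipeline/ag_emission_conversion.py | grazing_code_creation
-- ===== SOURCE A (Python) =====
-- def grazing_code_creation(dict1):
--     '''This will create a unique code for grazing, where the code is the parent animal, then itterated by decription.
--     This takes the input as a dictionary of the start of the code (eg. A.Grazing) and the ID'''
--     # Set counts for each animal type
--     count_a = 1
--     count_e = 1
--     count_d = 1
--     # create an empty dictionary that will be added to
--     dict2={}
--     # Loop through the dictionary and for each animal type increase the count and add it to the new dictionary
--     for k,v in dict1.items():
--         if v[:1]=='A':
--             code=v+'.'+str(count_a)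
--             count_a=count_a+1
--             dict2[k]=code
--         if v[:1]=='E':
--             code=v+'.'+str(count_e)
--             count_e=count_e+1
--             dict2[k]=code
--         if v[:1]=='D':
--             code=v+'.'+str(count_d)
--             count_d=count_d+1
--             dict2[k]=code
--     # Return a dictionary of the new codes
--     return(dict2)
-- ===== SOURCE B (Python) =====
-- def grazing_code_creation(dict1):
--     '''Stateless re-implementation: each code's number is computed directly as
--     1 + the number of earlier entries with the same animal-type prefix,
--     instead of maintaining running counters.'''
--     items = list(dict1.items())
--     return {k: v + '.' + str(1 + sum(1 for _, w in items[:i] if w[:1] == v[:1]))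
--             for i, (k, v) in enumerate(items)
--             if v[:1] in ('A', 'E', 'D')}
-- ===== Notes on version B (the rewrite author's own statement) =====
-- stated objective: alternative
-- what changed: Replaces A's single pass with three running counters and sequential ifs by a stateless dict comprehension that numbers each A/E/D entry directly as 1 + the count of earlier entries with the same first-letter prefix.
import Mathlib
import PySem

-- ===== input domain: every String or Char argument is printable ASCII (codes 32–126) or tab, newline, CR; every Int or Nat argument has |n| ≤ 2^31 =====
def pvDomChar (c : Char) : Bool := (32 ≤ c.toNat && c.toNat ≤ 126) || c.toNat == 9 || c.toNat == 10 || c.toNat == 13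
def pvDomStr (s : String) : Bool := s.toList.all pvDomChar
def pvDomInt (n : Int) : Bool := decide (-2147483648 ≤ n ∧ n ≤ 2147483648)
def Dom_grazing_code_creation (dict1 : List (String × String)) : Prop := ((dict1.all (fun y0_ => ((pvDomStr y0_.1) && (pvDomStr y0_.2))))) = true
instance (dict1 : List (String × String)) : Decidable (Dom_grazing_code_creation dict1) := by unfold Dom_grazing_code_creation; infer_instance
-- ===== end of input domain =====

-- B replaces A's running per-prefix counters by a stateless dict comprehension that
-- numbers each A/E/D entry as 1 + the count of earlier same-prefix entries (alternative decomposition).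
set_option maxHeartbeats 1000000


-- shared transliterations of the Python expressions v[:1] and v + '.' + str(n)
def pvPfx (v : String) : String := PySem.Str.slice v none (some 1)
def pvMkCode (v : String) (n : Int) : String := PySem.Str.join "" [v, ".", PySem.Int.toStr n]

-- ===== PORT A =====
-- one loop body: the three sequential ifs, each updating its counter and dict2
def pvStepA (st : Int × Int × Int × PySem.Dict String String) (kv : String × String) :
    Int × Int × Int × PySem.Dict String String :=
  match st, kv with
  | (ca, ce, cd, d2), (k, v) =>
    let s1 : Int × PySem.Dict String String :=
      if pvPfx v = "A" then (ca + 1, d2.insert k (pvMkCode v ca)) else (ca, d2)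
    let s2 : Int × PySem.Dict String String :=
      if pvPfx v = "E" then (ce + 1, s1.2.insert k (pvMkCode v ce)) else (ce, s1.2)
    let s3 : Int × PySem.Dict String String :=
      if pvPfx v = "D" then (cd + 1, s2.2.insert k (pvMkCode v cd)) else (cd, s2.2)
    (s1.1, s2.1, s3.1, s3.2)

def grazing_code_creation (dict1 : List (String × String)) : List (String × String) :=
  (dict1.foldl pvStepA (1, 1, 1, PySem.Dict.empty)).2.2.2.items

-- ===== PORT B =====
-- the comprehension's list of (key, code) pairs: filter then map, counting earlier same-prefix items in items[:i]
def pvBList (dict1 : List (String × String)) : List (String × String) :=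
  ((PySem.List.enumerate dict1 0).filter
      (fun p => decide (pvPfx p.2.2 ∈ (["A", "E", "D"] : List String)))).map
    (fun p =>
      (p.2.1,
        pvMkCode p.2.2
          (1 + ((PySem.List.slice dict1 none (some p.1)).filter
                  (fun q => pvPfx q.2 == pvPfx p.2.2)).length)))

def grazing_code_creation_alt (dict1 : List (String × String)) : List (String × String) :=
  ((pvBList dict1).foldl (fun d p => d.insert p.1 p.2) PySem.Dict.empty).items

-- ===== PRECONDITION & SPEC =====
-- Pre_ excludes association lists with duplicate keys: the argument is a Python dict, which
-- cannot carry duplicate keys, so such lists are outside the function's real input space.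
def Pre_grazing_code_creation (dict1 : List (String × String)) : Prop :=
  (dict1.map Prod.fst).Nodup
instance (dict1 : List (String × String)) : Decidable (Pre_grazing_code_creation dict1) := by
  unfold Pre_grazing_code_creation; infer_instance

def pvWitness_grazing_code_creation : (List (String × String)) :=
  [("cows", "A.Grazing"), ("hens", "E.Grazing"), ("x", "B.Other"), ("deer", "D.Grazing")]

def Spec_grazing_code_creation (dict1 : List (String × String)) (out : List (String × String)) : Prop :=
  out = grazing_code_creation_alt dict1
instance (dict1 : List (String × String)) (out : List (String × String)) :
    Decidable (Spec_grazing_code_creation dict1 out) := by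
  unfold Spec_grazing_code_creation; infer_instance

-- ===== CLAIM (what is proved, stated in full; the proofs are below) =====
def Claim_equal_grazing_code_creation : Prop :=
  ∀ (dict1 : List (String × String)), Dom_grazing_code_creation dict1 →
    Pre_grazing_code_creation dict1 →
    Spec_grazing_code_creation dict1 (grazing_code_creation dict1)

-- ===== LEMMAS AND PROOFS =====

-- specification of the stream of (key, code) pairs, shared by both proofs
def pvCodes : Int → Int → Int → List (String × String) → List (String × String)
  | _, _, _, [] => []
  | ca, ce, cd, (k, v) :: rest =>
    if pvPfx v = "A" then (k, pvMkCode v ca) :: pvCodes (ca + 1) ce cd rest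
    else if pvPfx v = "E" then (k, pvMkCode v ce) :: pvCodes ca (ce + 1) cd rest
    else if pvPfx v = "D" then (k, pvMkCode v cd) :: pvCodes ca ce (cd + 1) rest
    else pvCodes ca ce cd rest

theorem pvCodes_keys_sublist (l : List (String × String)) :
    ∀ ca ce cd, ((pvCodes ca ce cd l).map Prod.fst).Sublist (l.map Prod.fst) := by
  induction l with
  | nil => intro ca ce cd; simp [pvCodes]
  | cons p rest ih =>
    intro ca ce cd
    obtain ⟨k, v⟩ := p
    simp only [pvCodes]
    split_ifs with h1 h2 h3 <;> simp only [List.map_cons]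
    · exact (ih _ _ _).cons₂ k
    · exact (ih _ _ _).cons₂ k
    · exact (ih _ _ _).cons₂ k
    · exact (ih _ _ _).cons k

theorem pvA_items (l : List (String × String)) :
    ∀ ca ce cd (d : PySem.Dict String String),
      (∀ p ∈ l, d.contains p.1 = false) → (l.map Prod.fst).Nodup →
      (l.foldl pvStepA (ca, ce, cd, d)).2.2.2.items = d.items ++ pvCodes ca ce cd l := by
  induction l with
  | nil => intro ca ce cd d _ _; simp [pvCodes]
  | cons p rest ih =>
    intro ca ce cd d hfresh hnd
    obtain ⟨k, v⟩ := p
    have hk : d.contains k = false := hfresh (k, v) (List.mem_cons_self ..)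
    have hknot : k ∉ rest.map Prod.fst := by
      simpa using (List.nodup_cons.mp hnd).1
    have hndr : (rest.map Prod.fst).Nodup := (List.nodup_cons.mp hnd).2
    have hfresh' : ∀ w, ∀ p ∈ rest, (d.insert k w).contains p.1 = false := by
      intro w p hp
      rw [PySem.Dict.contains_insert]
      have h1 : d.contains p.1 = false := hfresh p (List.mem_cons_of_mem _ hp)
      have h2 : p.1 ≠ k := by
        intro he; exact hknot (he ▸ List.mem_map_of_mem hp)
      simp [h1, h2]
    have hfresh'' : ∀ p ∈ rest, d.contains p.1 = false :=
      fun p hp => hfresh p (List.mem_cons_of_mem _ hp)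
    simp only [List.foldl_cons, pvCodes, pvStepA]
    by_cases h1 : pvPfx v = "A"
    · have h2 : ¬ pvPfx v = "E" := by rw [h1]; decide
      have h3 : ¬ pvPfx v = "D" := by rw [h1]; decide
      simp only [h1, h2, h3, String.reduceEq, reduceIte]
      rw [ih _ _ _ _ (hfresh' _) hndr,
          PySem.Dict.items_insert_of_not_contains _ _ hk]
      simp [h1]
    · by_cases h2 : pvPfx v = "E"
      · have h3 : ¬ pvPfx v = "D" := by rw [h2]; decide
        simp only [h1, h2, h3, String.reduceEq, reduceIte]
        rw [ih _ _ _ _ (hfresh' _) hndr,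
            PySem.Dict.items_insert_of_not_contains _ _ hk]
        simp [h1, h2]
      · by_cases h3 : pvPfx v = "D"
        · simp only [h1, h2, h3, String.reduceEq, reduceIte]
          rw [ih _ _ _ _ (hfresh' _) hndr,
              PySem.Dict.items_insert_of_not_contains _ _ hk]
          simp [h1, h2, h3]
        · simp only [h1, h2, h3, String.reduceEq, reduceIte]
          rw [ih _ _ _ _ hfresh'' hndr]

-- count of entries whose value has prefix p
def pvCnt (xs : List (String × String)) (p : String) : Nat :=
  (xs.filter (fun q => pvPfx q.2 == p)).length

theorem pvCnt_append_singleton (xs : List (String × String)) (kv : String × String) (p : String) :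
    pvCnt (xs ++ [kv]) p = pvCnt xs p + (if pvPfx kv.2 == p then 1 else 0) := by
  simp only [pvCnt, List.filter_append, List.length_append]
  by_cases h : pvPfx kv.2 == p <;> simp [h]

theorem pvB_codes (l : List (String × String)) :
    ∀ done : List (String × String),
      (((PySem.List.enumerate l (done.length : Int)).filter
          (fun p => decide (pvPfx p.2.2 ∈ (["A", "E", "D"] : List String)))).map
        (fun p =>
          (p.2.1,
            pvMkCode p.2.2
              (1 + ((PySem.List.slice (done ++ l) none (some p.1)).filter
                      (fun q => pvPfx q.2 == pvPfx p.2.2)).length))))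
      = pvCodes (1 + pvCnt done "A") (1 + pvCnt done "E") (1 + pvCnt done "D") l := by
  induction l with
  | nil =>
    intro done
    simp only [PySem.List.enumerate_nil, List.filter_nil, List.map_nil, pvCodes]
  | cons kv rest ih =>
    intro done
    obtain ⟨k, v⟩ := kv
    have hslice : PySem.List.slice (done ++ (k, v) :: rest) none (some (done.length : Int))
        = done := by
      rw [PySem.List.slice_to (done ++ (k, v) :: rest) (Int.natCast_nonneg _)]
      simp [List.take_left]
    have hstep := ih (done ++ [(k, v)])
    have hlen : ((done ++ [(k, v)]).length : Int) = (done.length : Int) + 1 := by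
      push_cast [List.length_append, List.length_cons, List.length_nil]; ring
    rw [hlen, List.append_assoc] at hstep
    simp only [List.singleton_append] at hstep
    simp only [PySem.List.enumerate_cons]
    by_cases h1 : pvPfx v = "A"
    · have h2 : ¬ pvPfx v = "E" := by rw [h1]; decide
      have h3 : ¬ pvPfx v = "D" := by rw [h1]; decide
      rw [List.filter_cons_of_pos (by simp [h1])]
      simp only [pvCodes, h1, String.reduceEq, reduceIte]
      rw [List.map_cons, hstep]
      rw [List.cons_eq_cons]
      refine ⟨by simp [hslice, h1, pvCnt], ?_⟩
      rw [pvCnt_append_singleton, pvCnt_append_singleton, pvCnt_append_singleton]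
      simp only [h1]
      norm_num [h2, h3]
      ring_nf
    · by_cases h2 : pvPfx v = "E"
      · have h3 : ¬ pvPfx v = "D" := by rw [h2]; decide
        rw [List.filter_cons_of_pos (by simp [h2])]
        simp only [pvCodes, h1, h2, String.reduceEq, reduceIte]
        rw [List.map_cons, hstep]
        rw [List.cons_eq_cons]
        refine ⟨by simp [hslice, h2, pvCnt], ?_⟩
        rw [pvCnt_append_singleton, pvCnt_append_singleton, pvCnt_append_singleton]
        simp only [h2]
        norm_num [h1, h3]
        ring_nf
      · by_cases h3 : pvPfx v = "D"
        · rw [List.filter_cons_of_pos (by simp [h3])]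
          simp only [pvCodes, h1, h2, h3, String.reduceEq, reduceIte]
          rw [List.map_cons, hstep]
          rw [List.cons_eq_cons]
          refine ⟨by simp [hslice, h3, pvCnt], ?_⟩
          rw [pvCnt_append_singleton, pvCnt_append_singleton, pvCnt_append_singleton]
          simp only [h3]
          norm_num [h1, h2]
          ring_nf
        · rw [List.filter_cons_of_neg (by simp [h1, h2, h3])]
          rw [hstep]
          simp only [pvCodes, h1, h2, h3, String.reduceEq, reduceIte]
          rw [pvCnt_append_singleton, pvCnt_append_singleton, pvCnt_append_singleton]
          simp [h1, h2, h3]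

theorem pvBList_eq_codes (dict1 : List (String × String)) :
    pvBList dict1 = pvCodes 1 1 1 dict1 := by
  have h := pvB_codes dict1 []
  simpa [pvBList, pvCnt] using h

-- ===== VERDICT (by name: the statement is the Claim_ definition above) =====
theorem grazing_code_creation_spec : Claim_equal_grazing_code_creation := by
  intro dict1 _ hpre
  unfold Spec_grazing_code_creation grazing_code_creation grazing_code_creation_alt
  rw [pvBList_eq_codes]
  rw [pvA_items dict1 1 1 1 PySem.Dict.empty (by simp [PySem.Dict.contains_empty]) hpre]
  rw [PySem.Dict.items_foldl_insert_fresh (pvCodes 1 1 1 dict1) Prod.fst Prod.snd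
        PySem.Dict.empty
        (by simp [PySem.Dict.contains_empty])
        ((pvCodes_keys_sublist dict1 1 1 1).nodup hpre)]
  simp
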